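-- pv_equiv track=rewrite | github.com/Pedro-Machado10/Red-Hat-Training-Presents---Introduction-to-Python-Programming-9.0 | My work/Chapter 04/Exercise-11.py | intercecao
-- ===== SOURCE A (Python) =====
-- def intercecao(lista1,lista2):
--     listatotal = []
--     for n in lista1:
--         listatotal.append(n)
--     for n in lista2:
--         listatotal.append(n)
--
--     lista3 = []
--     for n in listatotal:
--         if n in lista1 and n in lista2:
--             if n in lista3:
--                 pass
--             else:
--                 lista3.append(n)
--
--     return lista3
-- ===== SOURCE B (Python) =====
-- def intercecao(lista1, lista2):
--     in2 = set(lista2)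
--     out = []
--     seen = set()
--     for n in lista1:
--         if n in in2 and n not in seen:
--             out.append(n)
--             seen.add(n)
--     return out
-- ===== Notes on version B (the rewrite author's own statement) =====
-- stated objective: simpler
-- what changed: B makes a single pass over lista1 with a prebuilt membership set for lista2 and a seen-set for dedup, instead of A's concatenation of both lists followed by a scan with nested 'in' tests on three lists; order is identical because every common element first occurs in the lista1 half of A's merged list.
import Mathlib
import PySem

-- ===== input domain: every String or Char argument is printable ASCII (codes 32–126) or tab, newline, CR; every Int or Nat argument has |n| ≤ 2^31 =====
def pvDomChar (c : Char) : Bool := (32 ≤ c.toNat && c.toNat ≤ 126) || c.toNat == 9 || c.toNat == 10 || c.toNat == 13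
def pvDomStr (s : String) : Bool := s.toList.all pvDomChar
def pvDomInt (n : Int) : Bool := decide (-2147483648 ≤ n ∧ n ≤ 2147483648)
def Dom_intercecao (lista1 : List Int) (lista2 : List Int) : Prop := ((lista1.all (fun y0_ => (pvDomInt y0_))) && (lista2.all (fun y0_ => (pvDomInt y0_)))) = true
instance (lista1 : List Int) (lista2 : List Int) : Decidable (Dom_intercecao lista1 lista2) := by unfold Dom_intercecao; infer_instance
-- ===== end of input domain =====

-- B replaces A's concatenate-then-rescan (nested 'in' tests on three lists) by a single
-- pass over lista1 with a set for lista2-membership and a seen-set for dedup (simpler/faster).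

-- ===== PORT A =====
def intercecao (lista1 : List Int) (lista2 : List Int) : List Int :=
  let listatotal :=
    lista2.foldl (fun acc n => acc ++ [n]) (lista1.foldl (fun acc n => acc ++ [n]) [])
  listatotal.foldl (fun lista3 n =>
    if n ∈ lista1 ∧ n ∈ lista2 then
      (if n ∈ lista3 then lista3 else lista3 ++ [n])
    else lista3) []

-- ===== PORT B =====
def intercecao_alt (lista1 : List Int) (lista2 : List Int) : List Int :=
  let in2 : PySem.Set Int := PySem.Set.ofList lista2
  (lista1.foldl (fun (st : List Int × PySem.Set Int) n =>
      if in2.contains n && !(st.2.contains n) then (st.1 ++ [n], st.2.add n) else st)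
    ([], PySem.Set.empty)).1

-- ===== PRECONDITION & SPEC =====
def Spec_intercecao (lista1 : List Int) (lista2 : List Int) (out : List Int) : Prop := out = intercecao_alt lista1 lista2
instance (lista1 : List Int) (lista2 : List Int) (out : List Int) : Decidable (Spec_intercecao lista1 lista2 out) := by unfold Spec_intercecao; infer_instance

-- ===== CLAIM (what is proved, stated in full; the proofs are below) =====
def Claim_equal_intercecao : Prop := ∀ (lista1 : List Int) (lista2 : List Int), Dom_intercecao lista1 lista2 → Spec_intercecao lista1 lista2 (intercecao lista1 lista2)

-- ===== LEMMAS AND PROOFS =====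

-- appending element by element is concatenation
theorem pv_foldl_app (l acc : List Int) :
    l.foldl (fun a n => a ++ [n]) acc = acc ++ l := by
  induction l generalizing acc with
  | nil => simp
  | cons a t ih => simp [List.foldl, ih]

-- A's inner loop step preserves membership
theorem pv_stepA_mono (l1 l2 acc : List Int) (n x : Int) (hx : x ∈ acc) :
    x ∈ (if n ∈ l1 ∧ n ∈ l2 then (if n ∈ acc then acc else acc ++ [n]) else acc) := by
  split_ifs <;> simp [hx]

theorem pv_foldA_mono (l1 l2 : List Int) (l acc : List Int) (x : Int) (hx : x ∈ acc) :
    x ∈ l.foldl (fun lista3 n =>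
      if n ∈ l1 ∧ n ∈ l2 then (if n ∈ lista3 then lista3 else lista3 ++ [n]) else lista3) acc := by
  induction l generalizing acc with
  | nil => exact hx
  | cons a t ih => exact ih _ (pv_stepA_mono l1 l2 acc a x hx)

-- after folding A's step over l, every common element of l is in the accumulator
theorem pv_foldA_covers (l1 l2 : List Int) (l acc : List Int) (n : Int)
    (hn : n ∈ l) (h1 : n ∈ l1) (h2 : n ∈ l2) :
    n ∈ l.foldl (fun lista3 m =>
      if m ∈ l1 ∧ m ∈ l2 then (if m ∈ lista3 then lista3 else lista3 ++ [m]) else lista3) acc := by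
  induction l generalizing acc with
  | nil => cases hn
  | cons a t ih =>
    rcases List.mem_cons.mp hn with h | hn
    · subst h
      rw [List.foldl_cons]
      apply pv_foldA_mono
      rw [if_pos ⟨h1, h2⟩]
      split_ifs with h <;> simp [h]
    · exact ih _ hn

-- if every common element of l is already in acc, folding A's step over l is a no-op
theorem pv_foldA_noop (l1 l2 : List Int) (l acc : List Int)
    (h : ∀ n ∈ l, n ∈ l1 → n ∈ l2 → n ∈ acc) :
    l.foldl (fun lista3 m =>
      if m ∈ l1 ∧ m ∈ l2 then (if m ∈ lista3 then lista3 else lista3 ++ [m]) else lista3) acc = acc := by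
  induction l with
  | nil => rfl
  | cons a t ih =>
    have hstep : (if a ∈ l1 ∧ a ∈ l2 then (if a ∈ acc then acc else acc ++ [a]) else acc) = acc := by
      split_ifs with hc hm
      · rfl
      · exact absurd (h a (by simp) hc.1 hc.2) hm
      · rfl
    simp only [List.foldl]
    rw [hstep]
    exact ih (fun n hn => h n (by simp [hn]))

-- A's first pass over l (a list of elements of l1) equals B's fold, given seen reflects acc
theorem pv_passes_eq (l1 l2 : List Int) (l : List Int) (hsub : ∀ n ∈ l, n ∈ l1)
    (acc : List Int) (seen : PySem.Set Int)
    (hseen : ∀ x : Int, x ∈ seen ↔ x ∈ acc) :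
    l.foldl (fun lista3 m =>
      if m ∈ l1 ∧ m ∈ l2 then (if m ∈ lista3 then lista3 else lista3 ++ [m]) else lista3) acc
    = (l.foldl (fun (st : List Int × PySem.Set Int) n =>
        if (PySem.Set.ofList l2).contains n && !(st.2.contains n) then (st.1 ++ [n], st.2.add n) else st)
        (acc, seen)).1 := by
  induction l generalizing acc seen with
  | nil => rfl
  | cons a t ih =>
    have ha1 : a ∈ l1 := hsub a (by simp)
    have hsub' : ∀ n ∈ t, n ∈ l1 := fun n hn => hsub n (by simp [hn])
    simp only [List.foldl]
    by_cases h2 : a ∈ l2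
    · by_cases hm : a ∈ acc
      · have hb : ((PySem.Set.ofList l2).contains a && !(seen.contains a)) = false := by
          simp only [Bool.and_eq_false_iff]
          right
          simpa using (hseen a).mpr hm
        rw [if_pos ⟨ha1, h2⟩, if_pos hm, hb]
        simp only [Bool.false_eq_true, if_false]
        exact ih hsub' acc seen hseen
      · have hb : ((PySem.Set.ofList l2).contains a && !(seen.contains a)) = true := by
          simp only [Bool.and_eq_true, Bool.not_eq_true']
          constructor
          · simpa [PySem.Set.mem_ofList] using h2
          · simpa using fun h => hm ((hseen a).mp h)
        rw [if_pos ⟨ha1, h2⟩, if_neg hm, hb, if_pos rfl]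
        apply ih hsub'
        intro x
        simp only [PySem.Set.mem_add, hseen, List.mem_append, List.mem_singleton]
    · have hb : ((PySem.Set.ofList l2).contains a && !(seen.contains a)) = false := by
        simp [PySem.Set.mem_ofList, h2]
      rw [if_neg (by tauto), hb]
      simp only [Bool.false_eq_true, if_false]
      exact ih hsub' acc seen hseen

-- ===== VERDICT (by name: the statement is the Claim_ definition above) =====
theorem intercecao_spec : Claim_equal_intercecao := by
  intro l1 l2 _
  unfold Spec_intercecao intercecao intercecao_alt
  simp only [pv_foldl_app, List.nil_append, List.foldl_append]
  rw [pv_foldA_noop l1 l2 l2 _ (fun n hn h1 h2 => pv_foldA_covers l1 l2 l1 [] n h1 h1 h2)]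
  exact pv_passes_eq l1 l2 l1 (fun n hn => hn) [] PySem.Set.empty (by simp [PySem.Set.empty])
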